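-- pv_equiv track=rewrite | github.com/philiplamscript/bloodXXXrecorder | Web/Backend/main.py | parse_votes
-- ===== SOURCE A (Python) =====
-- def parse_votes(votes_str):
--     """Converts a string of player numbers into a dictionary of voters."""
--     record_dict = {}
--     # Wrap with delimiters for easy lookahead/lookbehind
--     s = f"&{votes_str}&"
--     for i in range(1, len(s) - 1):
--         target = s[i]
--         if target != "&":
--             # Handle the +10 case logic from your original script
--             if (target == s[i+1]) and (target == s[i-1]):
--                 record_dict[f"1{target}"] = True
--                 record_dict[f"{target}"] = True
--             elif target != s[i+1]:
--                 if target == s[i-1]: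
--                     record_dict[f"1{target}"] = True
--                 else:
--                     record_dict[f"{target}"] = True
--     return record_dict
-- ===== SOURCE B (Python) =====
-- def parse_votes(votes_str):
--     """Converts a string of player numbers into a dictionary of voters."""
--     record_dict = {}
--     i, n = 0, len(votes_str)
--     while i < n:
--         c = votes_str[i]
--         # measure the maximal run of c starting at i
--         L = 1
--         while i + L < n and votes_str[i + L] == c:
--             L += 1
--         if c != '&':
--             if L == 2:
--                 record_dict['1' + c] = True
--             elif L == 1:
--                 record_dict[c] = True
--             else:
--                 record_dict['1' + c] = True
--                 record_dict[c] = True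
--         i += L
--     return record_dict
-- ===== Notes on version B (the rewrite author's own statement) =====
-- stated objective: simpler
-- what changed: B replaces A's sentinel-wrapped char-by-char pass that peeks at both neighbours of every index with a single scan over maximal runs of equal characters, mapping each run's length (1 / 2 / >=3) directly to the keys it contributes.
import Mathlib
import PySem

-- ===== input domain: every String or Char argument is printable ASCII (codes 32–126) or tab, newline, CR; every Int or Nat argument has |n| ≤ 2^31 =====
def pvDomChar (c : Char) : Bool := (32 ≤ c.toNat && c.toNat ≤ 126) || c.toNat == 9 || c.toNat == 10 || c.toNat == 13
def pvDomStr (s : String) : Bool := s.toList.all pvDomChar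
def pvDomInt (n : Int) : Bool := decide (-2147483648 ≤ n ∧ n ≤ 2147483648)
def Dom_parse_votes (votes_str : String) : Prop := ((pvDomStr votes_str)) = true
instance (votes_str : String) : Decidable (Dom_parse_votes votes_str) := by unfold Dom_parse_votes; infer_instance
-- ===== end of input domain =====

-- B replaces A's index-by-index neighbour-peeking pass (with sentinel-wrapped string) by a
-- single left-to-right scan over maximal runs of equal characters; same return value by a different traversal.

-- ===== PORT A =====
def pvKey1 (c : Char) : String := "1".push c        -- f"1{target}"
def pvKey0 (c : Char) : String := String.singleton c -- f"{target}"

def pvStepA (s : List Char) (d : PySem.Dict String Bool) (i : Int) : PySem.Dict String Bool :=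
  -- indices from range(1, len(s)-1) are always in range, so the '&' default of pyGetD is never used
  let target := PySem.List.pyGetD s i '&'
  if target ≠ '&' then
    if target = PySem.List.pyGetD s (i+1) '&' ∧ target = PySem.List.pyGetD s (i-1) '&' then
      (d.insert (pvKey1 target) true).insert (pvKey0 target) true
    else if target ≠ PySem.List.pyGetD s (i+1) '&' then
      if target = PySem.List.pyGetD s (i-1) '&' then d.insert (pvKey1 target) true
      else d.insert (pvKey0 target) true
    else d
  else d

def parse_votes (votes_str : String) : List (String × Bool) :=
  let s : List Char := '&' :: votes_str.toList ++ ['&']   -- s = f"&{votes_str}&"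
  ((PySem.List.pyRange 1 ((s.length : Int) - 1) 1).foldl (pvStepA s) PySem.Dict.empty).items

-- ===== PORT B =====
def pvRunEffect (d : PySem.Dict String Bool) (c : Char) (L : Nat) : PySem.Dict String Bool :=
  if c ≠ '&' then
    if L = 2 then d.insert (pvKey1 c) true
    else if L = 1 then d.insert (pvKey0 c) true
    else (d.insert (pvKey1 c) true).insert (pvKey0 c) true
  else d

-- Source B's outer while loop; its inner while loop (maximal run of c) is takeWhile/dropWhile
def pvAltLoop (d : PySem.Dict String Bool) : List Char → PySem.Dict String Bool
  | [] => d
  | c :: rest =>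
      pvAltLoop (pvRunEffect d c ((rest.takeWhile (· == c)).length + 1)) (rest.dropWhile (· == c))
  termination_by l => l.length
  decreasing_by
    simpa using Nat.lt_succ_of_le (List.length_dropWhile_le _ _)

def parse_votes_alt (votes_str : String) : List (String × Bool) :=
  (pvAltLoop PySem.Dict.empty votes_str.toList).items

-- ===== PRECONDITION & SPEC =====
def Spec_parse_votes (votes_str : String) (out : List (String × Bool)) : Prop := out = parse_votes_alt votes_str
instance (votes_str : String) (out : List (String × Bool)) : Decidable (Spec_parse_votes votes_str out) := by unfold Spec_parse_votes; infer_instance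

-- ===== CLAIM (what is proved, stated in full; the proofs are below) =====
def Claim_equal_parse_votes : Prop := ∀ (votes_str : String), Dom_parse_votes votes_str → Spec_parse_votes votes_str (parse_votes votes_str)

-- ===== LEMMAS AND PROOFS =====

-- A's loop body, rephrased on (previous char, current char, next char)
def pvBody (prev c next : Char) (d : PySem.Dict String Bool) : PySem.Dict String Bool :=
  if c ≠ '&' then
    if c = next ∧ c = prev then (d.insert (pvKey1 c) true).insert (pvKey0 c) true
    else if c ≠ next then
      if c = prev then d.insert (pvKey1 c) true
      else d.insert (pvKey0 c) true
    else d
  else d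

-- A's loop as a structural recursion carrying the previous character
def pvLoopA (prev : Char) : List Char → PySem.Dict String Bool → PySem.Dict String Bool
  | [], d => d
  | c :: rest, d => pvLoopA c rest (pvBody prev c (rest.headD '&') d)

theorem pvKeys_ne (c : Char) : pvKey1 c ≠ pvKey0 c := by
  intro h
  have h2 := congrArg String.toList h
  simp [pvKey1, pvKey0] at h2

theorem pv_head?_dropWhile {p : Char → Bool} {l : List Char} {x : Char}
    (h : (l.dropWhile p).head? = some x) : p x = false := by
  induction l with
  | nil => simp at h
  | cons a t ih =>
    by_cases hp : p a
    · simpa [hp] using ih (by simpa [hp] using h)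
    · simp [hp] at h; simpa [← h] using hp

theorem pv_insert_same {d : PySem.Dict String Bool} {k : String} {v : Bool}
    (hnd : d.keys.Nodup) (h : d.get? k = some v) : d.insert k v = d := by
  have hcon : d.contains k = true := by rw [PySem.Dict.contains_eq_isSome_get?, h]; rfl
  apply PySem.Dict.ext
  rw [PySem.Dict.items_insert_of_contains (d := d) (k := k) (v := v) hcon]
  have : ∀ p ∈ d.items, (if p.1 == k then (k, v) else p) = p := by
    intro p hp
    by_cases hk : p.1 == k
    · have hk' : p.1 = k := by simpa using hk
      have hm : (p.1, p.2) ∈ d.items := by simpa using hp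
      have hg := PySem.Dict.get?_of_mem_items d hm hnd
      rw [hk', h] at hg
      have hv : p.2 = v := (Option.some_inj.mp hg).symm
      have hpv : p = (k, v) := by rw [Prod.ext_iff]; exact ⟨hk', hv⟩
      simp [hpv]
    · simp [hk]
  simpa using List.map_congr_left this |>.trans (List.map_id _)

theorem pv_nodup_runEffect (d : PySem.Dict String Bool) (c : Char) (L : Nat)
    (hnd : d.keys.Nodup) : (pvRunEffect d c L).keys.Nodup := by
  unfold pvRunEffect
  split_ifs <;> simp [PySem.Dict.nodup_keys_insert, hnd]

-- a run of '&'s contributes nothing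
theorem pv_run_amp : ∀ (run : List Char), (∀ x ∈ run, x = '&') →
    ∀ (rest : List Char) (prev : Char) (d : PySem.Dict String Bool),
    pvLoopA prev ('&' :: (run ++ rest)) d = pvLoopA '&' rest d := by
  intro run
  induction run with
  | nil => intro _ rest prev d; simp [pvLoopA, pvBody]
  | cons x t ih =>
    intro hall rest prev d
    have hx : x = '&' := hall x (by simp)
    subst hx
    have := ih (fun y hy => hall y (by simp [hy])) rest '&' d
    simpa [pvLoopA, pvBody] using this

-- the tail of a run (previous char already equals c): one '1c' key, plus 'c' if the tail is longer than 1
theorem pv_mid : ∀ (run : List Char) (c : Char), c ≠ '&' → (∀ x ∈ run, x = c) →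
    ∀ (rest : List Char), (∀ x, rest.head? = some x → x ≠ c) →
    ∀ (d : PySem.Dict String Bool), d.keys.Nodup →
    pvLoopA c (c :: (run ++ rest)) d =
      pvLoopA c rest (if run.length = 0 then d.insert (pvKey1 c) true
                      else (d.insert (pvKey1 c) true).insert (pvKey0 c) true) := by
  intro run
  induction run with
  | nil =>
    intro c hc _ rest hr d _
    have hnext : ¬ (c = rest.head?.getD '&') := by
      cases rest with
      | nil => simpa using hc
      | cons y t => simpa using Ne.symm (hr y rfl)
    simp [pvLoopA, pvBody, hc, hnext]
  | cons x t ih =>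
    intro c hc hall rest hr d hnd
    have hx : c = x := (hall x (by simp)).symm
    subst hx
    -- first element: both neighbours equal c
    have h1 : pvLoopA c (c :: ((c :: t) ++ rest)) d =
        pvLoopA c (c :: (t ++ rest)) ((d.insert (pvKey1 c) true).insert (pvKey0 c) true) := by
      simp [pvLoopA, pvBody, hc]
    rw [h1, ih c hc (fun y hy => hall y (by simp [hy])) rest hr _
          (by simp [PySem.Dict.nodup_keys_insert, hnd])]
    -- collapse the repeated inserts
    have e1 : ((d.insert (pvKey1 c) true).insert (pvKey0 c) true).insert (pvKey1 c) true =
        (d.insert (pvKey1 c) true).insert (pvKey0 c) true := by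
      apply pv_insert_same (by simp [PySem.Dict.nodup_keys_insert, hnd])
      rw [PySem.Dict.get?_insert_of_ne _ _ (pvKeys_ne c), PySem.Dict.get?_insert_self]
    have e2 : (((d.insert (pvKey1 c) true).insert (pvKey0 c) true).insert (pvKey1 c) true).insert (pvKey0 c) true =
        (d.insert (pvKey1 c) true).insert (pvKey0 c) true := by
      rw [e1]
      exact pv_insert_same (by simp [PySem.Dict.nodup_keys_insert, hnd]) (PySem.Dict.get?_insert_self _ _ _)
    by_cases ht : t.length = 0
    · simp [ht, e1]
    · simp [ht, e2]

-- one whole maximal run, entered at a boundary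
theorem pv_run : ∀ (run : List Char) (c : Char), (∀ x ∈ run, x = c) →
    ∀ (rest : List Char), (∀ x, rest.head? = some x → x ≠ c) →
    ∀ (prev : Char), (c ≠ '&' → prev ≠ c) →
    ∀ (d : PySem.Dict String Bool), d.keys.Nodup →
    pvLoopA prev (c :: (run ++ rest)) d = pvLoopA c rest (pvRunEffect d c (run.length + 1)) := by
  intro run c hall rest hr prev hp d hnd
  by_cases hc : c = '&'
  · subst hc
    rw [pv_run_amp run hall rest prev d]
    simp [pvRunEffect]
  · have hprev := hp hc
    cases run with
    | nil =>
      have hnext : ¬ (c = rest.head?.getD '&') := by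
        cases rest with
        | nil => simpa using hc
        | cons y t => simpa using Ne.symm (hr y rfl)
      simp [pvLoopA, pvBody, hc, hnext, Ne.symm hprev, pvRunEffect]
    | cons x t =>
      have hx : c = x := (hall x (by simp)).symm
      subst hx
      -- first element: next equals c, previous does not: no key
      have h1 : pvLoopA prev (c :: ((c :: t) ++ rest)) d = pvLoopA c (c :: (t ++ rest)) d := by
        simp [pvLoopA, pvBody, hc, Ne.symm hprev]
      rw [h1, pv_mid t c hc (fun y hy => hall y (by simp [hy])) rest hr d hnd]
      by_cases ht : t.length = 0
      · simp [ht, pvRunEffect, hc]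
      · have : ¬ (t.length + 1 + 1 = 2) := by omega
        have h1' : ¬ (t.length + 1 + 1 = 1) := by omega
        simp [ht, pvRunEffect, hc, this]

-- the whole of A's loop is B's run loop
theorem pv_main : ∀ (N : Nat) (l : List Char), l.length ≤ N →
    ∀ (prev : Char), (∀ x, l.head? = some x → x ≠ '&' → prev ≠ x) →
    ∀ (d : PySem.Dict String Bool), d.keys.Nodup →
    pvLoopA prev l d = pvAltLoop d l := by
  intro N
  induction N with
  | zero =>
    intro l hl prev _ d _
    have : l = [] := List.length_eq_zero_iff.mp (Nat.le_zero.mp hl)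
    subst this; simp [pvLoopA, pvAltLoop]
  | succ n ih =>
    intro l hl prev hb d hnd
    cases l with
    | nil => simp [pvLoopA, pvAltLoop]
    | cons c rest =>
      have hsplit : rest = rest.takeWhile (· == c) ++ rest.dropWhile (· == c) :=
        (List.takeWhile_append_dropWhile).symm
      have hall : ∀ x ∈ rest.takeWhile (· == c), x = c := by
        intro x hx
        have := List.mem_takeWhile_imp hx
        simpa using this
      have hr : ∀ x, (rest.dropWhile (· == c)).head? = some x → x ≠ c := by
        intro x hx
        have := pv_head?_dropWhile hx
        simpa using this
      have hlhs : pvLoopA prev (c :: rest) d =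
          pvLoopA c (rest.dropWhile (· == c))
            (pvRunEffect d c ((rest.takeWhile (· == c)).length + 1)) := by
        conv_lhs => rw [hsplit]
        exact pv_run _ c hall _ hr prev (fun hc => hb c rfl hc) d hnd
      rw [hlhs, pvAltLoop]
      exact ih _ (by
          have h1 : (rest.dropWhile (· == c)).length ≤ rest.length := List.length_dropWhile_le _ _
          have h2 : rest.length ≤ n := by simpa using Nat.succ_le_succ_iff.mp (by simpa using hl)
          omega)
        c (fun x hx _ => Ne.symm (hr x hx)) _ (pv_nodup_runEffect d c _ hnd)

-- A's indexed loop over s = '&' ++ l ++ '&' is pvLoopA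
theorem pv_bridge (s : List Char) : ∀ (l₂ : List Char) (j : Nat) (prev : Char)
    (d : PySem.Dict String Bool), s.drop j = prev :: (l₂ ++ ['&']) →
    (PySem.List.pyRange ((j : Int) + 1) ((s.length : Int) - 1) 1).foldl (pvStepA s) d =
      pvLoopA prev l₂ d := by
  intro l₂
  induction l₂ with
  | nil =>
    intro j prev d h
    have hlen : s.length = j + 2 := by
      have := congrArg List.length h
      simp at this
      omega
    have : PySem.List.pyRange ((j : Int) + 1) ((s.length : Int) - 1) 1 = [] := by
      rw [PySem.List.pyRange_one]
      have : (((s.length : Int) - 1) - ((j : Int) + 1)).toNat = 0 := by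
        rw [hlen]; push_cast; omega
      simp [this]
    simp [this, pvLoopA]
  | cons c t ih =>
    intro j prev d h
    have hget : ∀ (k : Nat) (x : Char), (s.drop k).head? = some x →
        PySem.List.pyGetD s (k : Int) '&' = x := by
      intro k x hx
      rw [PySem.List.pyGetD_natCast, List.getD_eq_getElem?_getD, ← List.head?_drop, hx]
      rfl
    have hlen : s.length = j + t.length + 3 := by
      have := congrArg List.length h
      simp at this
      omega
    have hdj : (s.drop j).head? = some prev := by rw [h]; rfl
    have hd1 : s.drop (j + 1) = c :: (t ++ ['&']) := by
      rw [← List.tail_drop, h]; rfl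
    have hd1h : (s.drop (j + 1)).head? = some c := by rw [hd1]; rfl
    have hd2 : s.drop (j + 2) = t ++ ['&'] := by
      rw [show j + 2 = (j + 1) + 1 from rfl, ← List.tail_drop, hd1]; rfl
    have hd2h : (s.drop (j + 2)).head? = some (t.headD '&') := by
      rw [hd2]; cases t <;> rfl
    have hcons : PySem.List.pyRange ((j : Int) + 1) ((s.length : Int) - 1) 1 =
        ((j : Int) + 1) :: PySem.List.pyRange ((j : Int) + 1 + 1) ((s.length : Int) - 1) 1 := by
      apply PySem.List.pyRange_one_cons
      rw [hlen]; push_cast; omega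
    rw [hcons, List.foldl_cons]
    have hstep : pvStepA s d ((j : Int) + 1) = pvBody prev c (t.headD '&') d := by
      have e1 : PySem.List.pyGetD s ((j : Int) + 1) '&' = c := by
        rw [show (j : Int) + 1 = ((j + 1 : Nat) : Int) by push_cast; ring]
        exact hget _ _ hd1h
      have e2 : PySem.List.pyGetD s ((j : Int) + 1 + 1) '&' = t.headD '&' := by
        rw [show (j : Int) + 1 + 1 = ((j + 2 : Nat) : Int) by push_cast; ring]
        exact hget _ _ hd2h
      have e3 : PySem.List.pyGetD s ((j : Int) + 1 - 1) '&' = prev := by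
        rw [show (j : Int) + 1 - 1 = ((j : Nat) : Int) by ring]
        exact hget _ _ hdj
      simp only [pvStepA, pvBody, e1, e2, e3]
    rw [hstep]
    have := ih (j + 1) c (pvBody prev c (t.headD '&') d) (by rw [hd1])
    rw [show ((j : Int) + 1 + 1) = (((j + 1 : Nat) : Int) + 1) by push_cast; ring]
    rw [this]
    simp [pvLoopA]

-- ===== VERDICT (by name: the statement is the Claim_ definition above) =====
theorem parse_votes_spec : Claim_equal_parse_votes := by
  intro votes_str _
  unfold Spec_parse_votes
  have hb := pv_bridge ('&' :: votes_str.toList ++ ['&']) votes_str.toList 0 '&'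
      PySem.Dict.empty (by simp)
  simp only [Nat.cast_zero, zero_add] at hb
  show ((PySem.List.pyRange 1 ((('&' :: votes_str.toList ++ ['&']).length : Int) - 1) 1).foldl
      (pvStepA ('&' :: votes_str.toList ++ ['&'])) PySem.Dict.empty).items =
    (pvAltLoop PySem.Dict.empty votes_str.toList).items
  rw [hb]
  congr 1
  exact pv_main votes_str.toList.length votes_str.toList le_rfl '&'
    (fun x _ hx => Ne.symm hx) PySem.Dict.empty (by simp [PySem.Dict.keys_empty])
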